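-- pv_equiv track=rewrite | github.com/riyasyash/wemake-python-styleguide | wemake_python_styleguide/logics/variables.py | is_wrong_variable_name
-- ===== SOURCE A (Python) =====
-- from typing import Iterable, Optional
--
-- def is_wrong_variable_name(name: str, to_check: Iterable[str]) -> bool:
--     """
--     Checks that variable is not prohibited by explicitly listing it's name.
--
--     >>> is_wrong_variable_name('wrong', ['wrong'])
--     True
--     >>> is_wrong_variable_name('correct', ['wrong'])
--     False
--     >>> is_wrong_variable_name('_wrong', ['wrong'])
--     True
--     >>> is_wrong_variable_name('wrong_', ['wrong'])
--     True
--     >>> is_wrong_variable_name('wrong__', ['wrong'])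
--     False
--     >>> is_wrong_variable_name('__wrong', ['wrong'])
--     False
--
--     """
--     for name_to_check in to_check:
--         choices_to_check = [
--             name_to_check,
--             '_{0}'.format(name_to_check),
--             '{0}_'.format(name_to_check),
--         ]
--         if name in choices_to_check:
--             return True
--     return False
-- ===== SOURCE B (Python) =====
-- def is_wrong_variable_name(name, to_check):
--     candidates = {name}
--     if name.startswith('_'):
--         candidates.add(name[1:])
--     if name.endswith('_'):
--         candidates.add(name[:-1])
--     return not candidates.isdisjoint(to_check)
-- ===== Notes on version B (the rewrite author's own statement) =====
-- stated objective: faster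
-- what changed: Instead of scanning to_check and building a fresh 3-element variant list per element, B derives the O(1) set of base-form candidates from name (name itself, name without a leading '_', name without a trailing '_') once and tests set disjointness with to_check, removing all per-element string construction.
import Mathlib
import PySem

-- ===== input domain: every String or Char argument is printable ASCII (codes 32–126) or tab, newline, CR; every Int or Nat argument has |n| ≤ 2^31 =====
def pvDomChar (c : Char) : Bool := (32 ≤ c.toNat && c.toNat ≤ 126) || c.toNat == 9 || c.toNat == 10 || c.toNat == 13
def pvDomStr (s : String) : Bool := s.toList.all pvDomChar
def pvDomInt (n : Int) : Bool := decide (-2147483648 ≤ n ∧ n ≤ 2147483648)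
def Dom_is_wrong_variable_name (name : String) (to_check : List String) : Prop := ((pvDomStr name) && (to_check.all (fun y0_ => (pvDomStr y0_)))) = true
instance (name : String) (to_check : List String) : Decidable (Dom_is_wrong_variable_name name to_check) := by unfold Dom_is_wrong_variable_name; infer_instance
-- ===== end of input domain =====

-- B replaces A's scan that builds a 3-variant list per element of to_check by the O(1)
-- candidate base-forms of `name` and one set-disjointness test; return values are equal.

-- ===== PORT A =====
-- the 'for name_to_check in to_check: … return True / return False' loop, step for step
def isWrongVarLoopA (name : String) : List String → Bool
  | [] => false
  | name_to_check :: rest =>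
    let choices_to_check := [name_to_check, "_" ++ name_to_check, name_to_check ++ "_"]
    if choices_to_check.contains name then true else isWrongVarLoopA name rest

def is_wrong_variable_name (name : String) (to_check : List String) : Bool :=
  isWrongVarLoopA name to_check

-- ===== PORT B =====
def is_wrong_variable_name_alt (name : String) (to_check : List String) : Bool :=
  let c0 : PySem.Set String := PySem.Set.ofList [name]
  let c1 : PySem.Set String :=
    if PySem.Str.startswith name "_" then PySem.Set.add c0 (PySem.Str.slice name (some 1) none) else c0
  let c2 : PySem.Set String :=
    if PySem.Str.endswith name "_" then PySem.Set.add c1 (PySem.Str.slice name none (some (-1))) else c1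
  !(PySem.Set.isdisjoint c2 to_check)

-- ===== PRECONDITION & SPEC =====
def Spec_is_wrong_variable_name (name : String) (to_check : List String) (out : Bool) : Prop := out = is_wrong_variable_name_alt name to_check
instance (name : String) (to_check : List String) (out : Bool) : Decidable (Spec_is_wrong_variable_name name to_check out) := by unfold Spec_is_wrong_variable_name; infer_instance

-- ===== CLAIM (what is proved, stated in full; the proofs are below) =====
def Claim_equal_is_wrong_variable_name : Prop := ∀ (name : String) (to_check : List String), Dom_is_wrong_variable_name name to_check → Spec_is_wrong_variable_name name to_check (is_wrong_variable_name name to_check)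

-- ===== LEMMAS AND PROOFS =====

-- the candidate set of B, named for the proofs
def candSet (name : String) : PySem.Set String :=
  let c0 : PySem.Set String := PySem.Set.ofList [name]
  let c1 : PySem.Set String :=
    if PySem.Str.startswith name "_" then PySem.Set.add c0 (PySem.Str.slice name (some 1) none) else c0
  if PySem.Str.endswith name "_" then PySem.Set.add c1 (PySem.Str.slice name none (some (-1))) else c1

theorem any_contains_comm (s t : List String) :
    (s.any fun x => t.contains x) = (t.any fun x => s.contains x) := by
  rw [Bool.eq_iff_iff]
  simp only [List.any_eq_true, List.contains_iff_mem]
  tauto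

theorem alt_eq_any (name : String) (to_check : List String) :
    is_wrong_variable_name_alt name to_check
      = to_check.any (fun x => (candSet name).contains x) := by
  simp only [is_wrong_variable_name_alt, PySem.Set.isdisjoint, Bool.not_not]
  exact any_contains_comm (candSet name) to_check

-- pointwise: membership of name in A's 3-variant list for x ↔ x in B's candidate set
theorem underscore_pre (n x : List Char) : n = '_' :: x ↔ (['_'] <+: n ∧ x = n.tail) := by
  constructor
  · rintro rfl; simp
  · rintro ⟨⟨r, rfl⟩, rfl⟩; simp

theorem underscore_suf (n x : List Char) : n = x ++ ['_'] ↔ (['_'] <:+ n ∧ x = n.dropLast) := by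
  constructor
  · rintro rfl; simp
  · rintro ⟨⟨r, rfl⟩, rfl⟩; simp

theorem choices_iff (name x : String) :
    ([x, "_" ++ x, x ++ "_"].contains name) = (candSet name).contains x := by
  rw [Bool.eq_iff_iff]
  simp only [List.contains_iff_mem, PySem.Set.contains, List.mem_cons, List.not_mem_nil, or_false]
  have h1 : name = "_" ++ x ↔
      (PySem.Str.startswith name "_" = true ∧ x = PySem.Str.slice name (some 1) none) := by
    rw [String.ext_iff, String.ext_iff (s₁ := x)]
    simp only [String.toList_append, PySem.Str.toList_slice, PySem.Chars.slice_eq_listSlice,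
      PySem.List.slice_from_one, PySem.Str.startswith, PySem.Chars.startswith_iff,
      show "_".toList = ['_'] from rfl, List.singleton_append, List.tail]
    exact underscore_pre name.toList x.toList
  have h2 : name = x ++ "_" ↔
      (PySem.Str.endswith name "_" = true ∧ x = PySem.Str.slice name none (some (-1))) := by
    rw [String.ext_iff, String.ext_iff (s₁ := x)]
    simp only [String.toList_append, PySem.Str.toList_slice, PySem.Chars.slice_eq_listSlice,
      PySem.List.slice_to_neg_one, PySem.Str.endswith, PySem.Chars.endswith_iff,
      show "_".toList = ['_'] from rfl]
    exact underscore_suf name.toList x.toList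
  simp only [candSet]
  split_ifs with hs he he <;>
    simp_all [PySem.Set.mem_add, PySem.Set.mem_ofList, eq_comm (a := name)] <;> tauto


theorem loop_eq_any (name : String) (l : List String) :
    isWrongVarLoopA name l = l.any (fun x => (candSet name).contains x) := by
  induction l with
  | nil => rfl
  | cons x rest ih =>
    simp only [isWrongVarLoopA, List.any_cons, ← choices_iff name x, ih]
    cases h : [x, "_" ++ x, x ++ "_"].contains name <;> simp

theorem is_wrong_variable_name_spec : Claim_equal_is_wrong_variable_name := by
  intro name to_check _
  show is_wrong_variable_name name to_check = is_wrong_variable_name_alt name to_check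
  rw [alt_eq_any, is_wrong_variable_name, loop_eq_any]
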